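-- pv_equiv track=rewrite | github.com/ameforce/slack-emoji-tailor | app/services/converter_core.py | build_step_candidates
-- ===== SOURCE A (Python) =====
-- import math
-- from typing import List, Sequence, Tuple
--
-- def unique_preserve_order(values: Sequence[int]) -> List[int]:
--     seen = set()
--     out: List[int] = []
--     for value in values:
--         if value not in seen:
--             seen.add(value)
--             out.append(value)
--     return out
--
-- def build_step_candidates(frame_count: int, max_frames: int) -> List[int]:
--     if frame_count <= 1:
--         return [1]
--
--     min_step = max(1, math.ceil(frame_count / max(1, max_frames)))
--     ladder = [1, 2, 3, 4, 5, 6, 8, 10, 12, 14, 16, 20]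
--     candidates = [value for value in ladder if value >= min_step]
--     if not candidates:
--         candidates = [min_step]
--     if min_step not in candidates:
--         candidates.insert(0, min_step)
--     return unique_preserve_order(candidates)
-- ===== SOURCE B (Python) =====
-- def _from(min_step, ladder):
--     # ladder is ascending; walk it once, recursively:
--     # past the end -> [min_step]; hit min_step -> rest of ladder from here;
--     # first value above min_step -> min_step followed by the rest.
--     if not ladder:
--         return [min_step]
--     head = ladder[0]
--     if head == min_step:
--         return list(ladder)
--     if head > min_step:
--         return [min_step] + list(ladder)
--     return _from(min_step, ladder[1:])
--
-- def build_step_candidates(frame_count: int, max_frames: int):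
--     if frame_count <= 1:
--         return [1]
--     min_step = max(1, -(-frame_count // max(1, max_frames)))
--     return _from(min_step, (1, 2, 3, 4, 5, 6, 8, 10, 12, 14, 16, 20))
-- ===== Notes on version B (the rewrite author's own statement) =====
-- stated objective: simpler
-- what changed: Replaces A's staged pipeline (list-comprehension filter, empty-list fallback, membership test with front-insert, then a set-backed order-preserving dedup pass) by one early-returning recursive scan of the ascending ladder with a three-way head comparison, using no set, no filter and no dedup.
import Mathlib
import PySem

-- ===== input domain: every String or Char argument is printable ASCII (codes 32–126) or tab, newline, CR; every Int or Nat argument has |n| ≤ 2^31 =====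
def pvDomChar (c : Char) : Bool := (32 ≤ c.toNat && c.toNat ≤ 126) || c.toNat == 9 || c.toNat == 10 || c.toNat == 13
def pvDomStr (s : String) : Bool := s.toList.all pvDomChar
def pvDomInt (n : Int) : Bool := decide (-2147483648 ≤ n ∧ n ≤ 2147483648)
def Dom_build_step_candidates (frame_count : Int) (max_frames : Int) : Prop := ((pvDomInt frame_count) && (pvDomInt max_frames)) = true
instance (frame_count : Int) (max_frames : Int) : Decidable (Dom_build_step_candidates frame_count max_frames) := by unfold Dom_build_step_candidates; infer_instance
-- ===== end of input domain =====

-- B replaces A's filter/fallback/front-insert/dedup pipeline by one early-exit recursive scan of the ascending ladder; same values, simpler shape.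


-- ===== PORT A =====
def unique_preserve_order (values : List Int) : List Int :=
  (values.foldl
    (fun (st : PySem.Set Int × List Int) value =>
      if PySem.Set.contains st.1 value then st
      else (PySem.Set.add st.1 value, st.2 ++ [value]))
    (PySem.Set.empty, [])).2

-- math.ceil(frame_count / max(1, max_frames)) ported as exact ceiling division
-- -((-frame_count) // d): exact here since |frame_count|, |max_frames| ≤ 2^31 keeps the float division's ceil equal to the exact one.
def build_step_candidates (frame_count : Int) (max_frames : Int) : List Int :=
  if frame_count ≤ 1 then [1]
  else
    let min_step : Int := max 1 (-(PySem.Int.floordiv (-frame_count) (max 1 max_frames)))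
    let ladder : List Int := [1, 2, 3, 4, 5, 6, 8, 10, 12, 14, 16, 20]
    let candidates := ladder.filter (fun value => decide (min_step ≤ value))
    let candidates := if candidates = [] then [min_step] else candidates
    let candidates := if min_step ∈ candidates then candidates else min_step :: candidates
    unique_preserve_order candidates

-- ===== PORT B =====
-- B's recursive helper _from: early-exit scan of the ascending ladder
def bsc_from (min_step : Int) : List Int → List Int
  | [] => [min_step]
  | head :: rest =>
    if head = min_step then head :: rest
    else if min_step < head then min_step :: head :: rest
    else bsc_from min_step rest

def build_step_candidates_alt (frame_count : Int) (max_frames : Int) : List Int :=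
  if frame_count ≤ 1 then [1]
  else
    let min_step : Int := max 1 (-(PySem.Int.floordiv (-frame_count) (max 1 max_frames)))
    bsc_from min_step [1, 2, 3, 4, 5, 6, 8, 10, 12, 14, 16, 20]

-- ===== PRECONDITION & SPEC =====
def Spec_build_step_candidates (frame_count : Int) (max_frames : Int) (out : List Int) : Prop := out = build_step_candidates_alt frame_count max_frames
instance (frame_count : Int) (max_frames : Int) (out : List Int) : Decidable (Spec_build_step_candidates frame_count max_frames out) := by unfold Spec_build_step_candidates; infer_instance

-- ===== CLAIM (what is proved, stated in full; the proofs are below) =====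
def Claim_equal_build_step_candidates : Prop := ∀ (frame_count : Int) (max_frames : Int), Dom_build_step_candidates frame_count max_frames → Spec_build_step_candidates frame_count max_frames (build_step_candidates frame_count max_frames)

-- ===== LEMMAS AND PROOFS =====

-- when every ladder element is below m, the scan falls off the end and returns [m]
lemma bsc_from_all_lt (m : Int) (l : List Int) (h : ∀ x ∈ l, x < m) : bsc_from m l = [m] := by
  induction l with
  | nil => rfl
  | cons a t ih =>
    have ha := h a (List.mem_cons_self ..)
    simp only [bsc_from]
    rw [if_neg (by omega), if_neg (by omega)]
    exact ih (fun x hx => h x (List.mem_cons_of_mem _ hx))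

-- both post-min_step pipelines agree for every min_step value m ≥ 1
set_option maxHeartbeats 1600000 in
lemma core_eq (m : Int) (hm : 1 ≤ m) :
    unique_preserve_order
      (let ladder : List Int := [1, 2, 3, 4, 5, 6, 8, 10, 12, 14, 16, 20]
       let candidates := ladder.filter (fun value => decide (m ≤ value))
       let candidates := if candidates = [] then [m] else candidates
       if m ∈ candidates then candidates else m :: candidates)
    = bsc_from m [1, 2, 3, 4, 5, 6, 8, 10, 12, 14, 16, 20] := by
  by_cases h20 : m ≤ 20
  · interval_cases m <;> decide
  · have hnil : (([1, 2, 3, 4, 5, 6, 8, 10, 12, 14, 16, 20] : List Int).filter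
        (fun v => decide (m ≤ v))) = [] := by
      simp only [List.filter_eq_nil_iff]
      intro a ha
      fin_cases ha <;> simp <;> omega
    have hb : bsc_from m [1, 2, 3, 4, 5, 6, 8, 10, 12, 14, 16, 20] = [m] :=
      bsc_from_all_lt m _ (by intro x hx; fin_cases hx <;> omega)
    simp only [hnil, hb]
    simp [unique_preserve_order, PySem.Set.empty, PySem.Set.contains, PySem.Set.add]

theorem build_step_candidates_spec_aux (frame_count : Int) (max_frames : Int) :
    build_step_candidates frame_count max_frames
      = build_step_candidates_alt frame_count max_frames := by
  unfold build_step_candidates build_step_candidates_alt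
  by_cases h : frame_count ≤ 1
  · simp [h]
  · simp only [h, if_false]
    exact core_eq _ (le_max_left _ _)

-- ===== VERDICT (by name: the statement is the Claim_ definition above) =====
theorem build_step_candidates_spec : Claim_equal_build_step_candidates := by
  intro fc mx _
  exact build_step_candidates_spec_aux fc mx
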